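-- pv_equiv track=rewrite | github.com/Kusk24/Algorithm-Design-Class-Works | ALGORITHM_SUMMARY.py | population_growth
-- ===== SOURCE A (Python) =====
-- def population_growth(generations):
--     M = [0] * (generations + 1)
--     F = [0] * (generations + 1)
--     M[0] = 1  # Start with 1 male
--
--     for i in range(generations):
--         M[i+1] = F[i]
--         F[i+1] = M[i] + F[i]
--
--     return M[generations] + F[generations]
-- ===== SOURCE B (Python) =====
-- def population_growth(generations):
--     # Fast-doubling Fibonacci: fib_pair(n) returns (F(n), F(n+1)).
--     # The answer equals F(generations + 1).
--     def fib_pair(n):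
--         if n == 0:
--             return (0, 1)
--         a, b = fib_pair(n >> 1)
--         c = a * (2 * b - a)
--         d = a * a + b * b
--         if n & 1:
--             return (d, c + d)
--         return (c, d)
--     return fib_pair(generations + 1)[0]
-- ===== Notes on version B (the rewrite author's own statement) =====
-- stated objective: faster
-- what changed: Replaced the O(n) table-filling loop (two arrays M, F of size n+1) with fast-doubling on the Fibonacci recurrence, computing the answer F(n+1) in O(log n) steps.
import Mathlib
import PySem

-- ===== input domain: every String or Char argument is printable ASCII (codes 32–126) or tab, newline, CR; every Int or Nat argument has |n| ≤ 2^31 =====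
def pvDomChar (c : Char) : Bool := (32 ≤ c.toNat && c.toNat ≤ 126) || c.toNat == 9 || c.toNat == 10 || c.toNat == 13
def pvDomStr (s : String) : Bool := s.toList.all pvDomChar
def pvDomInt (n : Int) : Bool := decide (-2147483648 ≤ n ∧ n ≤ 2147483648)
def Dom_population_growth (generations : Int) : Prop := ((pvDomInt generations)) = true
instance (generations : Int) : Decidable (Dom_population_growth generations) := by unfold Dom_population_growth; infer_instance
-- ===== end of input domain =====

-- B replaces A's O(n) table-filling loop with O(log n) fast-doubling Fibonacci; equal on all generations ≥ 0 (A raises IndexError below 0).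


-- ===== PORT A =====
-- Python's mutable lists M, F are ported as Lean Arrays (hand-port, exact here: every index
-- A uses is nonnegative and in range whenever generations is nonnegative, i.e. on all of
-- Pre_; for negative generations Python raises IndexError).
-- loop body of A: M[i+1] = F[i]; F[i+1] = M[i] + F[i]  (reads in Python's execution order)
def stepA (MF : Array Int × Array Int) (i : Int) : Array Int × Array Int :=
  let M' := MF.1.setIfInBounds (i + 1).toNat (MF.2.getD i.toNat 0)
  let F' := MF.2.setIfInBounds (i + 1).toNat (M'.getD i.toNat 0 + MF.2.getD i.toNat 0)
  (M', F')

-- A builds arrays M, F of length generations+1, fills them left to right, returns M[g] + F[g].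
def population_growth (generations : Int) : Int :=
  let M := Array.replicate (generations + 1).toNat (0 : Int)
  let F := Array.replicate (generations + 1).toNat (0 : Int)
  let M := M.setIfInBounds 0 1
  let p := (PySem.List.pyRange 0 generations 1).foldl stepA (M, F)
  p.1.getD generations.toNat 0 + p.2.getD generations.toNat 0

-- ===== PORT B =====
-- fib_pair n = (F(n), F(n+1)) by fast doubling.
def fibPairB (n : Nat) : Int × Int :=
  if _h : n = 0 then (0, 1)
  else
    let p := fibPairB (n / 2)
    let a := p.1
    let b := p.2
    let c := a * (2 * b - a)
    let d := a * a + b * b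
    if n % 2 = 1 then (d, c + d) else (c, d)
  termination_by n
  decreasing_by exact Nat.div_lt_self (Nat.pos_of_ne_zero _h) (by omega)

def population_growth_alt (generations : Int) : Int :=
  (fibPairB (generations + 1).toNat).1

-- ===== PRECONDITION & SPEC =====
-- A raises IndexError for negative generations: the freshly built list is empty, and the
-- very first assignment into it fails.
def Pre_population_growth (generations : Int) : Prop := 0 ≤ generations
instance (generations : Int) : Decidable (Pre_population_growth generations) := by
  unfold Pre_population_growth; infer_instance
def pvWitness_population_growth : Int := (5)

def Spec_population_growth (generations : Int) (out : Int) : Prop := out = population_growth_alt generations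
instance (generations : Int) (out : Int) : Decidable (Spec_population_growth generations out) := by unfold Spec_population_growth; infer_instance

-- ===== CLAIM (what is proved, stated in full; the proofs are below) =====
def Claim_equal_population_growth : Prop := ∀ (generations : Int), Dom_population_growth generations → Pre_population_growth generations → Spec_population_growth generations (population_growth generations)

-- ===== LEMMAS AND PROOFS =====

def fibZ (n : Nat) : Int := (Nat.fib n : Int)

-- B-side correctness of fast doubling
lemma fibZ_two_mul (k : Nat) : fibZ (2 * k) = fibZ k * (2 * fibZ (k + 1) - fibZ k) := by
  have h : Nat.fib k ≤ 2 * Nat.fib (k + 1) :=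
    le_trans (Nat.fib_le_fib_succ) (by omega)
  simp only [fibZ, Nat.fib_two_mul]
  push_cast [h]
  ring

lemma fibZ_two_mul_add_one (k : Nat) :
    fibZ (2 * k + 1) = fibZ k * fibZ k + fibZ (k + 1) * fibZ (k + 1) := by
  simp only [fibZ, Nat.fib_two_mul_add_one]
  push_cast
  ring

lemma fibZ_add_two (k : Nat) : fibZ (k + 2) = fibZ k + fibZ (k + 1) := by
  simp [fibZ, Nat.fib_add_two]

lemma fibPairB_doubling (k : Nat) (p : Int × Int) (hp : p = (fibZ k, fibZ (k + 1))) :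
    (if (2 * k + 1) % 2 = 1 then
        (p.1 * p.1 + p.2 * p.2, p.1 * (2 * p.2 - p.1) + (p.1 * p.1 + p.2 * p.2))
      else (p.1 * (2 * p.2 - p.1), p.1 * p.1 + p.2 * p.2))
      = (fibZ (2 * k + 1), fibZ (2 * k + 2)) ∧
    (if (2 * k) % 2 = 1 then
        (p.1 * p.1 + p.2 * p.2, p.1 * (2 * p.2 - p.1) + (p.1 * p.1 + p.2 * p.2))
      else (p.1 * (2 * p.2 - p.1), p.1 * p.1 + p.2 * p.2))
      = (fibZ (2 * k), fibZ (2 * k + 1)) := by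
  subst hp
  constructor
  · rw [if_pos (by omega)]
    refine Prod.ext ?_ ?_ <;> simp only
    · rw [fibZ_two_mul_add_one]
    · rw [fibZ_add_two, fibZ_two_mul, fibZ_two_mul_add_one]
  · rw [if_neg (by omega)]
    refine Prod.ext ?_ ?_ <;> simp only
    · rw [fibZ_two_mul]
    · rw [fibZ_two_mul_add_one]

lemma fibPairB_eq (n : Nat) : fibPairB n = (fibZ n, fibZ (n + 1)) := by
  induction n using Nat.strong_induction_on with
  | _ n ih =>
    rw [fibPairB]
    by_cases h0 : n = 0
    · simp [h0, fibZ]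
    · simp only [h0, dif_neg, not_false_iff]
      have hlt : n / 2 < n := Nat.div_lt_self (Nat.pos_of_ne_zero h0) (by omega)
      have hpair := fibPairB_doubling (n / 2) (fibPairB (n / 2)) (ih (n / 2) hlt)
      by_cases hm : n % 2 = 1
      · have hn : n = 2 * (n / 2) + 1 := by omega
        have := hpair.1
        rw [← hn] at this
        rw [show 2 * (n / 2) + 2 = n + 1 by omega] at this
        simpa using this
      · have hn : n = 2 * (n / 2) := by omega
        have := hpair.2
        rw [← hn] at this
        simpa using this

-- A-side: explicit description of the two arrays after k loop iterations
def mrow (n k : Nat) : List Int :=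
  (List.range (n + 1)).map (fun j => if j = 0 then 1 else if j ≤ k then fibZ (j - 1) else 0)
def frow (n k : Nat) : List Int :=
  (List.range (n + 1)).map (fun j => if 1 ≤ j ∧ j ≤ k then fibZ j else 0)

lemma length_mrow (n k : Nat) : (mrow n k).length = n + 1 := by simp [mrow]
lemma length_frow (n k : Nat) : (frow n k).length = n + 1 := by simp [frow]

-- bridges between Arrays (port-A state) and the List rows used by the invariant
lemma arr_getD (xs : List Int) (i : Nat) (d : Int) : xs.toArray.getD i d = xs.getD i d := by
  simp [Array.getD, List.getD]
  split_ifs with h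
  · simp [List.getElem?_eq_getElem h]
  · simp [List.getElem?_eq_none (by omega : xs.length ≤ i)]

lemma arr_set (xs : List Int) (i : Nat) (v : Int) :
    xs.toArray.setIfInBounds i v = (xs.set i v).toArray := by simp

lemma arr_repl (n : Nat) (v : Int) : Array.replicate n v = (List.replicate n v).toArray := by simp

lemma init_mrow (n : Nat) :
    (List.replicate (n + 1) (0 : Int)).set 0 1 = mrow n 0 := by
  apply List.ext_getElem
  · simp [mrow]
  · intro j h1 h2
    simp only [mrow, List.getElem_set, List.getElem_replicate, List.getElem_map,
      List.getElem_range]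
    split_ifs <;> omega

lemma init_frow (n : Nat) : List.replicate (n + 1) (0 : Int) = frow n 0 := by
  apply List.ext_getElem
  · simp [frow]
  · intro j h1 h2
    simp only [frow, List.getElem_replicate, List.getElem_map, List.getElem_range]
    split_ifs with h
    · omega
    · rfl

lemma getD_mrow (n k j : Nat) (hj : j ≤ n) :
    (mrow n k).getD j 0 = if j = 0 then 1 else if j ≤ k then fibZ (j - 1) else 0 := by
  have hjl : j < (mrow n k).length := by rw [length_mrow]; omega
  rw [List.getD_eq_getElem _ _ hjl]
  simp [mrow]

lemma getD_frow (n k j : Nat) (hj : j ≤ n) :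
    (frow n k).getD j 0 = if 1 ≤ j ∧ j ≤ k then fibZ j else 0 := by
  have hjl : j < (frow n k).length := by rw [length_frow]; omega
  rw [List.getD_eq_getElem _ _ hjl]
  simp [frow]

lemma set_mrow (n k : Nat) (_hk : k < n) :
    (mrow n k).set (k + 1) (fibZ k) = mrow n (k + 1) := by
  apply List.ext_getElem
  · simp [mrow]
  · intro j h1 h2
    simp only [mrow, List.getElem_set, List.getElem_map, List.getElem_range]
    by_cases hj : j = k + 1
    · simp only [hj, if_true]
      rw [if_neg (by omega), if_pos (by omega)]
      rfl
    · rw [if_neg (Ne.symm hj)]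
      split_ifs <;> first | rfl | omega

lemma set_frow (n k : Nat) (_hk : k < n) :
    (frow n k).set (k + 1) (fibZ (k + 1)) = frow n (k + 1) := by
  apply List.ext_getElem
  · simp [frow]
  · intro j h1 h2
    simp only [frow, List.getElem_set, List.getElem_map, List.getElem_range]
    by_cases hj : j = k + 1
    · simp only [hj, if_true]
      rw [if_pos (by omega)]
    · rw [if_neg (Ne.symm hj)]
      split_ifs <;> first | rfl | omega

lemma stepA_row (n k : Nat) (hk : k < n) :
    stepA ((mrow n k).toArray, (frow n k).toArray) (k : Int)
      = ((mrow n (k + 1)).toArray, (frow n (k + 1)).toArray) := by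
  have hc1 : ((k : Int) + 1).toNat = k + 1 := by omega
  have hc0 : ((k : Int)).toNat = k := by omega
  have hFk : (frow n k).getD k 0 = fibZ k := by
    rw [getD_frow n k k (by omega)]
    split_ifs with h
    · rfl
    · have : k = 0 := by omega
      simp [this, fibZ]
  have hMk : (mrow n (k + 1)).getD k 0 = if k = 0 then 1 else fibZ (k - 1) := by
    rw [getD_mrow n (k + 1) k (by omega)]
    split_ifs <;> first | rfl | omega
  have hval : (if k = 0 then (1 : Int) else fibZ (k - 1)) + fibZ k = fibZ (k + 1) := by
    split_ifs with h
    · simp [h, fibZ]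
    · have hk1 : k - 1 + 2 = k + 1 := by omega
      have hk2 : k - 1 + 1 = k := by omega
      rw [← hk1, fibZ_add_two, hk2]
  simp only [stepA, hc1, hc0, arr_getD, arr_set]
  rw [hFk, set_mrow n k hk, hMk, hval, set_frow n k hk]

lemma fold_rows (n k : Nat) (hk : k ≤ n) :
    ((List.range k).map (fun j : Nat => (j : Int))).foldl stepA
        ((mrow n 0).toArray, (frow n 0).toArray)
      = ((mrow n k).toArray, (frow n k).toArray) := by
  induction k with
  | zero => simp
  | succ k ih =>
    have hk' : k ≤ n := by omega
    rw [List.range_succ, List.map_append, List.foldl_append, ih hk']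
    simp only [List.map_cons, List.map_nil, List.foldl_cons, List.foldl_nil]
    exact stepA_row n k (by omega)

lemma population_growth_closed (n : Nat) :
    population_growth (n : Int) = fibZ (n + 1) := by
  have htoNat : ((n : Int) + 1).toNat = n + 1 := by omega
  have hrange : PySem.List.pyRange 0 (n : Int) 1 = (List.range n).map (fun j : Nat => (j : Int)) :=
    PySem.List.pyRange_zero_natCast n
  have htoNat0 : ((n : Int)).toNat = n := by omega
  simp only [population_growth, htoNat, htoNat0, hrange, arr_repl, arr_set]
  rw [init_mrow, init_frow, fold_rows n n (le_refl n)]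
  simp only [arr_getD]
  rw [getD_mrow n n n (le_refl n), getD_frow n n n (le_refl n)]
  by_cases hn0 : n = 0
  · simp [hn0, fibZ]
  · rw [if_neg hn0, if_pos (le_refl n), if_pos (by omega : 1 ≤ n ∧ n ≤ n)]
    have hk1 : n - 1 + 2 = n + 1 := by omega
    have hk2 : n - 1 + 1 = n := by omega
    rw [← hk1, fibZ_add_two, hk2]

-- ===== VERDICT (by name: the statement is the Claim_ definition above) =====
theorem population_growth_spec : Claim_equal_population_growth := by
  intro g _hdom hpre
  unfold Spec_population_growth population_growth_alt
  have hg : g = ((g.toNat : Nat) : Int) := by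
    have := Int.toNat_of_nonneg hpre; omega
  rw [hg, population_growth_closed, fibPairB_eq]
  have h2 : ((g.toNat : Int) + 1).toNat = g.toNat + 1 := by omega
  rw [h2]
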